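-- pv_equiv track=rewrite | github.com/tlijkkkk/mark_v | leetcode-practice/leetcode_practice/two_pointers/leetcode2576.py | find_max_num_marked_indices
-- ===== SOURCE A (Python) =====
-- from typing import List
--
-- def find_max_num_marked_indices(nums: List[int]) -> int:
--     nums.sort()
--     nums_sorted = sorted(nums)
--     i = 0
--     j = len(nums_sorted) // 2
--     count = 0
--
--     while i < len(nums_sorted) // 2 and j < len(nums_sorted):
--         if nums_sorted[i] * 2 <= nums_sorted[j]:
--             count += 1
--             i += 1
--         j += 1
--
--     return count * 2
-- ===== SOURCE B (Python) =====
-- from typing import List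
--
-- def find_max_num_marked_indices(nums: List[int]) -> int:
--     nums.sort()
--     n = len(nums)
--     m = n // 2
--
--     def feasible(k: int) -> bool:
--         return all(nums[i] * 2 <= nums[n - k + i] for i in range(k))
--
--     lo, hi = 0, m
--     while lo < hi:
--         mid = (lo + hi + 1) // 2
--         if feasible(mid):
--             lo = mid
--         else:
--             hi = mid - 1
--     return 2 * lo
-- ===== Notes on version B (the rewrite author's own statement) =====
-- stated objective: alternative
-- what changed: Replaced A's linear two-pointer greedy scan over the sorted halves by a binary search on the number of pairs k, with a feasibility check pairing the k smallest elements against the k largest; both still sort the list in place first.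
import Mathlib
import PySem

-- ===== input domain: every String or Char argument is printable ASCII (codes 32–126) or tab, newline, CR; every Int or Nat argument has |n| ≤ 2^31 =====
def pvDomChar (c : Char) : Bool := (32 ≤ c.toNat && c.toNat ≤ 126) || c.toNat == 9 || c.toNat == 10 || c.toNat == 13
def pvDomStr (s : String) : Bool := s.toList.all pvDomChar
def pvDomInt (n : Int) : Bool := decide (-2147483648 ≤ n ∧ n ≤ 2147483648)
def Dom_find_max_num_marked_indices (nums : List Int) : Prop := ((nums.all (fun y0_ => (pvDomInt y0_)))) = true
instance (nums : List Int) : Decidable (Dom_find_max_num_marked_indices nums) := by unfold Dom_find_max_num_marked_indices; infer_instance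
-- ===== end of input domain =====

-- B replaces A's two-pointer scan by a binary search on the number of pairs k (feasibility
-- checked on the first k vs last k sorted elements); equivalence is about the return value,
-- and both A and B sort the argument list in place (same mutation).

-- ===== PORT A =====
-- A's while loop: i, j, count; i and count advance together when a pair is found.
def pvLoopA (s : List Int) (m n i j count : Nat) : Nat :=
  if _h : i < m ∧ j < n then
    if s.getD i 0 * 2 ≤ s.getD j 0 then pvLoopA s m n (i+1) (j+1) (count+1)
    else pvLoopA s m n i (j+1) count
  else count
termination_by n - j
decreasing_by all_goals omega

def find_max_num_marked_indices (nums : List Int) : Int :=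
  let nums := PySem.List.sorted nums (fun x => x) false
  let nums_sorted := PySem.List.sorted nums (fun x => x) false
  ((pvLoopA nums_sorted (nums_sorted.length / 2) nums_sorted.length 0
      (nums_sorted.length / 2) 0) * 2 : Nat)

-- ===== PORT B =====
-- all(nums[i] * 2 <= nums[n - k + i] for i in range(k))
def pvFeasB (s : List Int) (n k : Nat) : Bool :=
  (List.range k).all fun i => s.getD i 0 * 2 ≤ s.getD (n - k + i) 0

-- lo/hi binary search for the largest feasible k
def pvSearchB (s : List Int) (n lo hi : Nat) : Nat :=
  if _h : lo < hi then
    let mid := (lo + hi + 1) / 2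
    if pvFeasB s n mid then pvSearchB s n mid hi else pvSearchB s n lo (mid - 1)
  else lo
termination_by hi - lo
decreasing_by all_goals omega

def find_max_num_marked_indices_alt (nums : List Int) : Int :=
  let s := PySem.List.sorted nums (fun x => x) false
  2 * (pvSearchB s s.length 0 (s.length / 2) : Nat)

-- ===== PRECONDITION & SPEC =====
def Spec_find_max_num_marked_indices (nums : List Int) (out : Int) : Prop := out = find_max_num_marked_indices_alt nums
instance (nums : List Int) (out : Int) : Decidable (Spec_find_max_num_marked_indices nums out) := by unfold Spec_find_max_num_marked_indices; infer_instance

-- ===== CLAIM (what is proved, stated in full; the proofs are below) =====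
def Claim_equal_find_max_num_marked_indices : Prop := ∀ (nums : List Int), Dom_find_max_num_marked_indices nums → Spec_find_max_num_marked_indices nums (find_max_num_marked_indices nums)

-- ===== LEMMAS AND PROOFS =====

-- F s j k: the k smallest elements pair with the k elements just below index j.
def pvF (s : List Int) (j k : Nat) : Prop :=
  ∀ i < k, s.getD i 0 * 2 ≤ s.getD (j - k + i) 0

-- getD-level monotonicity of a sorted list
lemma pv_sorted_getD_mono (nums : List Int) (p q : Nat) (hpq : p ≤ q)
    (hq : q < (PySem.List.sorted nums (fun x => x) false).length) :
    (PySem.List.sorted nums (fun x => x) false).getD p 0 ≤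
      (PySem.List.sorted nums (fun x => x) false).getD q 0 := by
  have hp : p < (PySem.List.sorted nums (fun x => x) false).length := lt_of_le_of_lt hpq hq
  rw [List.getD_eq_getElem _ _ hp, List.getD_eq_getElem _ _ hq]
  exact PySem.List.sorted_id_getElem_mono nums hpq hq

lemma pvF_iff (s : List Int) (n k : Nat) : pvFeasB s n k = true ↔ pvF s n k := by
  simp [pvFeasB, pvF, List.all_eq_true, List.mem_range]

-- abstract sortedness hypothesis used in the core lemmas
def pvMono (s : List Int) (n : Nat) : Prop :=
  n ≤ s.length ∧ ∀ p q : Nat, p ≤ q → q < n → s.getD p 0 ≤ s.getD q 0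

-- shifting the pairing window rightwards preserves feasibility
lemma pvF_shift (s : List Int) (n : Nat) (hs : pvMono s n) (j j' k : Nat)
    (hk : k ≤ j) (hj : j ≤ j') (hj' : j' ≤ n) (hF : pvF s j k) : pvF s j' k := by
  intro i hi
  have := hF i hi
  have hle : s.getD (j - k + i) 0 ≤ s.getD (j' - k + i) 0 :=
    hs.2 _ _ (by omega) (by omega)
  omega

-- feasibility is antitone in k (on a sorted list)
lemma pvF_mono_down (s : List Int) (n : Nat) (hs : pvMono s n) :
    ∀ a, a ≤ n → pvF s n a → ∀ b, b ≤ a → pvF s n b := by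
  intro a
  induction a with
  | zero => intro _ h b hb; interval_cases b; exact h
  | succ a ih =>
    intro ha hF b hb
    rcases Nat.eq_or_lt_of_le hb with rfl | hlt
    · exact hF
    · refine ih (by omega) ?_ b (by omega)
      intro i hi
      have := hF i (by omega)
      have hle : s.getD (n - (a+1) + i) 0 ≤ s.getD (n - a + i) 0 :=
        hs.2 _ _ (by omega) (by omega)
      omega

-- greedy invariant: pvLoopA computes the maximum feasible pairing size
lemma pvLoopA_spec (s : List Int) (m n : Nat) (hs : pvMono s n) (hm : m + m ≤ n) :
    ∀ fuel j i, n - j ≤ fuel → m ≤ j → j ≤ n → i ≤ m → i + m ≤ j → pvF s j i →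
    (∀ k, k ≤ m → k + m ≤ j → pvF s j k → k ≤ i) →
    pvLoopA s m n i j i ≤ m ∧ pvF s n (pvLoopA s m n i j i) ∧
      (∀ k, k ≤ m → pvF s n k → k ≤ pvLoopA s m n i j i) := by
  intro fuel
  induction fuel with
  | zero =>
    intro j i hfuel hmj hjn him himj hF hmax
    have hj : j = n := by omega
    rw [pvLoopA, dif_neg (show ¬ (i < m ∧ j < n) by omega)]
    rw [hj] at hF hmax
    exact ⟨him, hF, fun k hk hFk => hmax k hk (by omega) hFk⟩
  | succ fuel ih =>
    intro j i hfuel hmj hjn him himj hF hmax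
    rw [pvLoopA]
    by_cases hcond : i < m ∧ j < n
    · rw [dif_pos hcond]
      by_cases htake : s.getD i 0 * 2 ≤ s.getD j 0
      · rw [if_pos htake]
        refine ih (j+1) (i+1) (by omega) (by omega) (by omega) (by omega) (by omega) ?_ ?_
        · -- pvF s (j+1) (i+1)
          intro t ht
          rcases Nat.lt_or_ge t i with h1 | h1
          · have := hF t h1
            have : (j + 1) - (i+1) + t = j - i + t := by omega
            rw [this]
            omega
          · have heq : (j + 1) - (i+1) + t = j := by omega
            rw [heq, show t = i by omega]
            exact htake
        · -- maximality at (j+1, i+1)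
          intro k hk hkm hFk
          rcases Nat.eq_zero_or_pos k with rfl | hkpos
          · omega
          have hF' : pvF s j (k-1) := by
            intro t ht
            have := hFk t (by omega)
            have heq : (j + 1) - k + t = j - (k-1) + t := by omega
            rw [heq] at this
            exact this
          have := hmax (k-1) (by omega) (by omega) hF'
          omega
      · rw [if_neg htake]
        refine ih (j+1) i (by omega) (by omega) (by omega) him (by omega) ?_ ?_
        · exact pvF_shift s n hs j (j+1) i (by omega) (by omega) (by omega) hF
        · intro k hk hkm hFk
          rcases Nat.eq_zero_or_pos k with rfl | hkpos
          · omega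
          have hF' : pvF s j (k-1) := by
            intro t ht
            have := hFk t (by omega)
            have heq : (j + 1) - k + t = j - (k-1) + t := by omega
            rw [heq] at this
            exact this
          have hk1 : k - 1 ≤ i := hmax (k-1) (by omega) (by omega) hF'
          by_contra hgt
          have hki : k = i + 1 := by omega
          have := hFk i (by omega)
          have heq : (j + 1) - k + i = j := by omega
          rw [heq] at this
          exact htake this
    · rw [dif_neg hcond]
      rcases Nat.lt_or_ge i m with h1 | h1
      · -- then j = n
        have hj : j = n := by omega
        rw [hj] at hF hmax
        exact ⟨him, hF, fun k hk hFk => hmax k hk (by omega) hFk⟩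
      · -- i = m
        have hi : i = m := by omega
        rw [hi] at hF ⊢
        exact ⟨le_refl m, pvF_shift s n hs j n m (by omega) hjn (le_refl n) hF,
          fun k hk _ => by omega⟩

-- binary search invariant
lemma pvSearchB_spec (s : List Int) (m n : Nat) (hs : pvMono s n) (hm : m ≤ n) :
    ∀ fuel lo hi, hi - lo ≤ fuel → lo ≤ hi → hi ≤ m → pvF s n lo →
    (∀ k, k ≤ m → pvF s n k → k ≤ hi) →
    pvSearchB s n lo hi ≤ m ∧ pvF s n (pvSearchB s n lo hi) ∧
      (∀ k, k ≤ m → pvF s n k → k ≤ pvSearchB s n lo hi) := by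
  intro fuel
  induction fuel with
  | zero =>
    intro lo hi hfuel hlohi hhim hF hmax
    have h : lo = hi := by omega
    rw [pvSearchB, dif_neg (show ¬ lo < hi by omega)]
    exact ⟨by omega, hF, fun k hk hFk => by have := hmax k hk hFk; omega⟩
  | succ fuel ih =>
    intro lo hi hfuel hlohi hhim hF hmax
    rw [pvSearchB]
    by_cases hcond : lo < hi
    · rw [dif_pos hcond]
      by_cases hfeas : pvFeasB s n ((lo + hi + 1) / 2) = true
      · rw [if_pos hfeas]
        exact ih ((lo + hi + 1) / 2) hi (by omega) (by omega) hhim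
          ((pvF_iff s n _).mp hfeas) hmax
      · rw [if_neg hfeas]
        refine ih lo ((lo + hi + 1) / 2 - 1) (by omega) ?_ (by omega) hF ?_
        · by_contra h
          exact hfeas ((pvF_iff s n _).mpr
            (pvF_mono_down s n hs lo (by omega) hF _ (by omega)))
        · intro k hk hFk
          have hkhi := hmax k hk hFk
          by_contra hgt
          exact hfeas ((pvF_iff s n _).mpr
            (pvF_mono_down s n hs k (by omega) hFk _ (by omega)))
    · rw [dif_neg hcond]
      exact ⟨by omega, hF, fun k hk hFk => by have := hmax k hk hFk; omega⟩

-- ===== VERDICT (by name: the statement is the Claim_ definition above) =====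
theorem find_max_num_marked_indices_spec : Claim_equal_find_max_num_marked_indices := by
  intro nums _
  unfold Spec_find_max_num_marked_indices
  simp only [find_max_num_marked_indices, find_max_num_marked_indices_alt,
    PySem.List.sorted_sorted]
  set s := PySem.List.sorted nums (fun x => x) false with hsdef
  set n := s.length with hndef
  have hs : pvMono s n := ⟨le_refl _, fun p q hpq hq => pv_sorted_getD_mono nums p q hpq hq⟩
  have hA := pvLoopA_spec s (n/2) n hs (by omega) n (n/2) 0 (by omega) (by omega)
    (by omega) (by omega) (by omega) (fun i hi => absurd hi (by omega))
    (fun k hk hkm _ => by omega)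
  have hB := pvSearchB_spec s (n/2) n hs (by omega) (n/2) 0 (n/2) (by omega) (by omega)
    (by omega) (fun i hi => absurd hi (by omega)) (fun k hk _ => hk)
  have h1 : pvLoopA s (n/2) n 0 (n/2) 0 ≤ pvSearchB s n 0 (n/2) :=
    hB.2.2 _ hA.1 hA.2.1
  have h2 : pvSearchB s n 0 (n/2) ≤ pvLoopA s (n/2) n 0 (n/2) 0 :=
    hA.2.2 _ hB.1 hB.2.1
  have heq : pvLoopA s (n/2) n 0 (n/2) 0 = pvSearchB s n 0 (n/2) := by omega
  rw [heq]
  push_cast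
  ring
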